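-- pv_equiv track=rewrite | github.com/ekant1999/Instructor-Assistant | modules/phase1-python/src/ia_phase1/tables.py | _split_cell_for_extra_column
-- ===== SOURCE A (Python) =====
-- from typing import Any, Dict, Iterable, List, Optional, Tuple
--
-- def _clean_cell(value: Any, *, keep_newlines: bool = False) -> str:
--     text = str(value or "").replace("\x00", " ")
--     text = text.replace("\r\n", "\n").replace("\r", "\n")
--     if keep_newlines:
--         lines = [" ".join(line.split()).strip() for line in text.split("\n")]
--         lines = [line for line in lines if line]
--         return "\n".join(lines).strip()
--     text = " ".join(text.split())
--     return text.strip()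
--
-- def _split_cell_for_extra_column(cell: str) -> Tuple[str, str]:
--     compact = _clean_cell(cell, keep_newlines=True)
--     if not compact:
--         return "", ""
--     if "\n" in compact:
--         lines = [part.strip() for part in compact.split("\n") if part.strip()]
--         left_parts: List[str] = []
--         right_parts: List[str] = []
--         for line in lines:
--             left, right = _split_cell_for_extra_column(line)
--             left_parts.append(left)
--             right_parts.append(right)
--         return "\n".join(part for part in left_parts if part), "\n".join(part for part in right_parts if part)
--
--     parts = compact.split()
--     if len(parts) <= 1:
--         return compact, ""
--     return parts[0], " ".join(parts[1:])
-- ===== SOURCE B (Python) =====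
-- def _split_cell_for_extra_column(cell):
--     text = str(cell or "").replace("\x00", " ").replace("\r\n", "\n").replace("\r", "\n")
--     lefts, rights = [], []
--     for line in text.split("\n"):
--         parts = line.split()
--         if parts:
--             lefts.append(parts[0])
--             if len(parts) > 1:
--                 rights.append(" ".join(parts[1:]))
--     return "\n".join(lefts), "\n".join(rights)
-- ===== Notes on version B (the rewrite author's own statement) =====
-- stated objective: simpler
-- what changed: B replaces A's clean-then-recurse scheme (which re-cleans and re-splits every line in a self-recursive call) by one flat pass: normalize the newlines once, then for each raw line split it into whitespace tokens and emit head/rest directly, joining at the end.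
import Mathlib
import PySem

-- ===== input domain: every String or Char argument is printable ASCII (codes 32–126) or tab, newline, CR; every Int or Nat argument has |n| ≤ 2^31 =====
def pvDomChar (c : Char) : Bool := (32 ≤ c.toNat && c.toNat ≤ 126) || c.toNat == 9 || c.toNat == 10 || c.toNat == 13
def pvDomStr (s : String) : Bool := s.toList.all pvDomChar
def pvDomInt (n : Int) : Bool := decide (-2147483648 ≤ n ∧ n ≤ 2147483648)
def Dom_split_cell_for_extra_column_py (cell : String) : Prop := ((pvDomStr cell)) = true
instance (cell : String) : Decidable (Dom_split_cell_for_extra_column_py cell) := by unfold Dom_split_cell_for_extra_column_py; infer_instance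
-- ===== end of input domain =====

-- B replaces A's clean-then-recurse scheme by one flat pass over the normalized lines (objective: simpler).

-- ===== PORT A =====
-- shared first step of both Pythons: str(cell or "").replace("\x00", " ").replace("\r\n", "\n").replace("\r", "\n")
def pvNormalize (s : List Char) : List Char :=
  PySem.Chars.replace (PySem.Chars.replace (PySem.Chars.replace s [Char.ofNat 0] [' ']) ['\r', '\n'] ['\n']) ['\r'] ['\n']

-- _clean_cell(value, keep_newlines=True)
def pvCleanKeepNL (s : List Char) : List Char :=
  let text := pvNormalize s
  let lines := (PySem.Chars.splitOn text ['\n']).map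
      (fun line => PySem.Chars.strip (PySem.Chars.join [' '] (PySem.Chars.split₀ line)))
  let lines := lines.filter (fun l => l ≠ ([] : List Char))
  PySem.Chars.strip (PySem.Chars.join ['\n'] lines)

-- A's recursion; the fuel argument is a totality guard only (never exhausted: the recursion depth is ≤ 2)
def pvSplitA : Nat → List Char → List Char × List Char
  | 0, _ => ([], [])
  | fuel+1, cell =>
    let compact := pvCleanKeepNL cell
    if compact = [] then ([], [])
    else if PySem.Chars.isIn ['\n'] compact then
      let lines := ((PySem.Chars.splitOn compact ['\n']).map PySem.Chars.strip).filter
        (fun p => p ≠ ([] : List Char))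
      let lr := lines.foldl (fun acc line =>
        let p := pvSplitA fuel line
        (acc.1 ++ [p.1], acc.2 ++ [p.2])) (([] : List (List Char)), ([] : List (List Char)))
      (PySem.Chars.join ['\n'] (lr.1.filter (fun p => p ≠ ([] : List Char))),
       PySem.Chars.join ['\n'] (lr.2.filter (fun p => p ≠ ([] : List Char))))
    else
      let parts := PySem.Chars.split₀ compact
      if parts.length ≤ 1 then (compact, [])
      else (parts.headD [], PySem.Chars.join [' '] parts.tail)

def split_cell_for_extra_column_py (cell : String) : String × String :=
  let r := pvSplitA (cell.toList.length + 2) cell.toList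
  (String.ofList r.1, String.ofList r.2)

-- ===== PORT B =====
def split_cell_for_extra_column_py_alt (cell : String) : String × String :=
  let text := pvNormalize cell.toList
  let lr := (PySem.Chars.splitOn text ['\n']).foldl (fun acc line =>
      match PySem.Chars.split₀ line with
      | [] => acc
      | p0 :: rest =>
        (acc.1 ++ [p0], if rest = [] then acc.2 else acc.2 ++ [PySem.Chars.join [' '] rest]))
    (([] : List (List Char)), ([] : List (List Char)))
  (String.ofList (PySem.Chars.join ['\n'] lr.1), String.ofList (PySem.Chars.join ['\n'] lr.2))

-- ===== PRECONDITION & SPEC =====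
def Spec_split_cell_for_extra_column_py (cell : String) (out : String × String) : Prop := out = split_cell_for_extra_column_py_alt cell
instance (cell : String) (out : String × String) : Decidable (Spec_split_cell_for_extra_column_py cell out) := by unfold Spec_split_cell_for_extra_column_py; infer_instance

-- ===== CLAIM (what is proved, stated in full; the proofs are below) =====
def Claim_equal_split_cell_for_extra_column_py : Prop := ∀ (cell : String), Dom_split_cell_for_extra_column_py cell → Spec_split_cell_for_extra_column_py cell (split_cell_for_extra_column_py cell)

-- ===== LEMMAS AND PROOFS =====


theorem pv_split₀_go_sound (l : List Char) : ∀ (cur : List Char) (acc : List (List Char)),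
    (∀ c ∈ cur, PySem.Chars.isspace c = false) →
    ∀ tk ∈ PySem.Chars.split₀.go l cur acc,
      tk ∈ acc ∨ (tk ≠ [] ∧ ∀ c ∈ tk, PySem.Chars.isspace c = false ∧ (c ∈ cur ∨ c ∈ l)) := by
  induction l with
  | nil =>
    intro cur acc hcur tk htk
    simp only [PySem.Chars.split₀.go] at htk
    by_cases hc : cur.isEmpty
    · rw [if_pos hc, List.mem_reverse] at htk; exact Or.inl htk
    · rw [if_neg hc, List.mem_reverse] at htk
      rcases List.mem_cons.mp htk with h | h
      · subst h
        refine Or.inr ⟨by simpa using hc, fun c hcmem => ?_⟩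
        rw [List.mem_reverse] at hcmem
        exact ⟨hcur c hcmem, Or.inl hcmem⟩
      · exact Or.inl h
  | cons c rest ih =>
    intro cur acc hcur tk htk
    by_cases hws : PySem.Chars.isspace c
    · by_cases hc : cur.isEmpty
      · simp only [PySem.Chars.split₀.go, hws, hc, if_true] at htk
        rcases ih [] acc (by simp) tk htk with h | ⟨h1, h2⟩
        · exact Or.inl h
        · exact Or.inr ⟨h1, fun x hx => ⟨(h2 x hx).1,
            Or.inr (List.mem_cons_of_mem _ ((h2 x hx).2.resolve_left (by simp)))⟩⟩
      · simp only [PySem.Chars.split₀.go, hws, hc, if_true, if_false] at htk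
        rcases ih [] (cur.reverse :: acc) (by simp) tk htk with h | ⟨h1, h2⟩
        · rcases List.mem_cons.mp h with h | h
          · subst h
            refine Or.inr ⟨by simpa using hc, fun x hx => ?_⟩
            rw [List.mem_reverse] at hx
            exact ⟨hcur x hx, Or.inl hx⟩
          · exact Or.inl h
        · exact Or.inr ⟨h1, fun x hx => ⟨(h2 x hx).1,
            Or.inr (List.mem_cons_of_mem _ ((h2 x hx).2.resolve_left (by simp)))⟩⟩
    · simp only [PySem.Chars.split₀.go, hws, if_false] at htk
      rcases ih (c :: cur) acc (by
        intro x hx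
        rcases List.mem_cons.mp hx with h | h
        · subst h; simpa using hws
        · exact hcur x h) tk htk with h | ⟨h1, h2⟩
      · exact Or.inl h
      · refine Or.inr ⟨h1, fun x hx => ⟨(h2 x hx).1, ?_⟩⟩
        rcases (h2 x hx).2 with h | h
        · rcases List.mem_cons.mp h with h | h
          · exact Or.inr (by simp [h])
          · exact Or.inl h
        · exact Or.inr (List.mem_cons_of_mem _ h)

theorem pv_split₀_sound (l : List Char) :
    ∀ tk ∈ PySem.Chars.split₀ l, tk ≠ [] ∧ ∀ c ∈ tk, PySem.Chars.isspace c = false ∧ c ∈ l := by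
  intro tk htk
  rcases pv_split₀_go_sound l [] [] (by simp) tk htk with h | ⟨h1, h2⟩
  · simp at h
  · exact ⟨h1, fun c hc => ⟨(h2 c hc).1, (h2 c hc).2.resolve_left (by simp)⟩⟩


theorem pv_go_token (tk : List Char) (htk : ∀ c ∈ tk, PySem.Chars.isspace c = false) :
    ∀ (l cur : List Char) (acc : List (List Char)),
      PySem.Chars.split₀.go (tk ++ l) cur acc = PySem.Chars.split₀.go l (tk.reverse ++ cur) acc := by
  induction tk with
  | nil => intro l cur acc; simp
  | cons c t ih =>
    intro l cur acc
    have hc : PySem.Chars.isspace c = false := htk c (by simp)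
    rw [List.cons_append]
    simp only [PySem.Chars.split₀.go, hc, if_false]
    rw [ih (fun x hx => htk x (List.mem_cons_of_mem _ hx)) l (c :: cur) acc]
    simp

theorem pv_split₀_join_go (tks : List (List Char))
    (h : ∀ tk ∈ tks, tk ≠ [] ∧ ∀ c ∈ tk, PySem.Chars.isspace c = false) :
    ∀ acc, PySem.Chars.split₀.go (PySem.Chars.join [' '] tks) [] acc = acc.reverse ++ tks := by
  induction tks with
  | nil =>
    intro acc
    rw [PySem.Chars.join_nil]
    simp [PySem.Chars.split₀.go]
  | cons tk rest ih =>
    intro acc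
    have h1 := h tk (by simp)
    cases rest with
    | nil =>
      rw [PySem.Chars.join_singleton]
      have := pv_go_token tk h1.2 [] [] acc
      simp only [List.append_nil] at this
      rw [this]
      have hrev : tk.reverse.isEmpty = false := by simp [h1.1]
      simp [PySem.Chars.split₀.go, hrev]
    | cons tk2 rest2 =>
      rw [PySem.Chars.join_cons_cons]
      rw [show tk ++ [' '] ++ PySem.Chars.join [' '] (tk2 :: rest2)
            = tk ++ (' ' :: PySem.Chars.join [' '] (tk2 :: rest2)) by simp]
      rw [pv_go_token tk h1.2 _ [] acc]
      have hsp : PySem.Chars.isspace ' ' = true := by decide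
      have hrev : tk.reverse.isEmpty = false := by simp [h1.1]
      simp only [PySem.Chars.split₀.go, hsp, if_true, List.append_nil,
        hrev, Bool.false_eq_true, if_false, List.reverse_reverse]
      rw [ih (fun x hx => h x (List.mem_cons_of_mem _ hx)) (tk :: acc)]
      simp

theorem pv_split₀_join (tks : List (List Char))
    (h : ∀ tk ∈ tks, tk ≠ [] ∧ ∀ c ∈ tk, PySem.Chars.isspace c = false) :
    PySem.Chars.split₀ (PySem.Chars.join [' '] tks) = tks := by
  have := pv_split₀_join_go tks h []
  simpa [PySem.Chars.split₀] using this


-- membership: chars of every piece of splitOn come from the input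
theorem pv_splitOn_go_mem (sep : List Char) : ∀ (fuel : Nat) (l cur : List Char) (acc : List (List Char)),
    ∀ p ∈ PySem.Chars.splitOn.go sep fuel l cur acc,
      p ∈ acc ∨ ∀ c ∈ p, c ∈ cur ∨ c ∈ l := by
  intro fuel
  induction fuel with
  | zero =>
    intro l cur acc p hp
    simp only [PySem.Chars.splitOn.go, List.mem_reverse] at hp
    rcases List.mem_cons.mp hp with h | h
    · subst h
      refine Or.inr fun c hc => ?_
      rcases List.mem_append.mp hc with h | h
      · exact Or.inl (List.mem_reverse.mp h)
      · exact Or.inr h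
    · exact Or.inl h
  | succ fuel ih =>
    intro l cur acc p hp
    cases l with
    | nil =>
      simp only [PySem.Chars.splitOn.go, List.mem_reverse] at hp
      rcases List.mem_cons.mp hp with h | h
      · subst h; exact Or.inr fun c hc => Or.inl (List.mem_reverse.mp hc)
      · exact Or.inl h
    | cons c t =>
      by_cases hpre : sep.isPrefixOf (c :: t)
      · simp only [PySem.Chars.splitOn.go, hpre, if_true] at hp
        rcases ih _ _ _ p hp with h | h
        · rcases List.mem_cons.mp h with h | h
          · subst h
            exact Or.inr fun x hx => Or.inl (List.mem_reverse.mp hx)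
          · exact Or.inl h
        · refine Or.inr fun x hx => ?_
          rcases h x hx with h | h
          · exact absurd h (List.not_mem_nil)
          · exact Or.inr (List.mem_of_mem_drop h)
      · simp only [PySem.Chars.splitOn.go, hpre, if_false] at hp
        rcases ih _ _ _ p hp with h | h
        · exact Or.inl h
        · refine Or.inr fun x hx => ?_
          rcases h x hx with h | h
          · rcases List.mem_cons.mp h with h | h
            · exact Or.inr (by simp [h])
            · exact Or.inl h
          · exact Or.inr (List.mem_cons_of_mem _ h)

theorem pv_splitOn_mem (l sep : List Char) :
    ∀ p ∈ PySem.Chars.splitOn l sep, ∀ c ∈ p, c ∈ l := by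
  intro p hp c hc
  rcases pv_splitOn_go_mem sep (l.length + 1) l [] [] p hp with h | h
  · simp at h
  · exact (h c hc).resolve_left (by simp)


-- consume a '\n'-free chunk up to its end
theorem pv_splitOn_go_chunk (l : List Char) (hnl : '\n' ∉ l) :
    ∀ (fuel : Nat) (cur : List Char) (acc : List (List Char)), l.length ≤ fuel →
      PySem.Chars.splitOn.go ['\n'] fuel l cur acc = ((cur.reverse ++ l) :: acc).reverse := by
  induction l with
  | nil =>
    intro fuel cur acc _
    cases fuel <;> simp [PySem.Chars.splitOn.go]
  | cons c t ih =>
    intro fuel cur acc hle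
    cases fuel with
    | zero => simp at hle
    | succ fuel =>
      have hc : c ≠ '\n' := fun h => hnl (by simp [h])
      have hpre : (['\n'] : List Char).isPrefixOf (c :: t) = false := by
        simp [List.isPrefixOf, hc.symm]
      simp only [PySem.Chars.splitOn.go, hpre, Bool.false_eq_true, if_false]
      rw [ih (fun h => hnl (List.mem_cons_of_mem _ h)) fuel (c :: cur) acc (by simpa using hle)]
      simp

-- consume a '\n'-free chunk followed by a separator
theorem pv_splitOn_go_sep (l : List Char) (hnl : '\n' ∉ l) :
    ∀ (fuel : Nat) (rest cur : List Char) (acc : List (List Char)), l.length + 1 ≤ fuel →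
      PySem.Chars.splitOn.go ['\n'] fuel (l ++ '\n' :: rest) cur acc
        = PySem.Chars.splitOn.go ['\n'] (fuel - (l.length + 1)) rest [] ((cur.reverse ++ l) :: acc) := by
  induction l with
  | nil =>
    intro fuel rest cur acc hle
    cases fuel with
    | zero => omega
    | succ fuel =>
      have hpre : (['\n'] : List Char).isPrefixOf ('\n' :: rest) = true := by
        simp [List.isPrefixOf]
      simp only [List.nil_append, PySem.Chars.splitOn.go, hpre, if_true]
      simp
  | cons c t ih =>
    intro fuel rest cur acc hle
    cases fuel with
    | zero => omega
    | succ fuel =>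
      have hc : c ≠ '\n' := fun h => hnl (by simp [h])
      have hpre : (['\n'] : List Char).isPrefixOf (c :: (t ++ '\n' :: rest)) = false := by
        simp [List.isPrefixOf, hc.symm]
      simp only [List.cons_append, PySem.Chars.splitOn.go, hpre, Bool.false_eq_true, if_false]
      rw [ih (fun h => hnl (List.mem_cons_of_mem _ h)) fuel rest (c :: cur) acc
        (by simp only [List.length_cons] at hle; omega)]
      have e1 : fuel + 1 - ((c :: t).length + 1) = fuel - (t.length + 1) := by
        simp only [List.length_cons]; omega
      have e2 : cur.reverse ++ c :: t = (c :: cur).reverse ++ t := by simp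
      rw [e1, e2]

theorem pv_splitOn_join_go (ls : List (List Char)) (hls : ls ≠ [])
    (hnl : ∀ l ∈ ls, '\n' ∉ l) :
    ∀ (fuel : Nat) (acc : List (List Char)), (PySem.Chars.join ['\n'] ls).length + 1 ≤ fuel →
      PySem.Chars.splitOn.go ['\n'] fuel (PySem.Chars.join ['\n'] ls) [] acc = acc.reverse ++ ls := by
  induction ls with
  | nil => simp at hls
  | cons l rest ih =>
    intro fuel acc hle
    cases rest with
    | nil =>
      rw [PySem.Chars.join_singleton] at *
      rw [pv_splitOn_go_chunk l (hnl l (by simp)) fuel [] acc (by omega)]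
      simp
    | cons l2 rest2 =>
      rw [PySem.Chars.join_cons_cons] at *
      rw [show l ++ ['\n'] ++ PySem.Chars.join ['\n'] (l2 :: rest2)
            = l ++ '\n' :: PySem.Chars.join ['\n'] (l2 :: rest2) by simp]
      have hlen : l.length + 1 + ((PySem.Chars.join ['\n'] (l2 :: rest2)).length + 1) ≤ fuel := by
        simp only [List.length_append, List.length_cons, List.length_nil] at hle; omega
      rw [pv_splitOn_go_sep l (hnl l (by simp)) fuel _ [] acc (by omega)]
      simp only [List.reverse_nil, List.nil_append]
      rw [ih (by simp) (fun x hx => hnl x (List.mem_cons_of_mem _ hx)) _ (l :: acc) (by omega)]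
      simp

theorem pv_splitOn_join (ls : List (List Char)) (hls : ls ≠ [])
    (hnl : ∀ l ∈ ls, '\n' ∉ l) :
    PySem.Chars.splitOn (PySem.Chars.join ['\n'] ls) ['\n'] = ls := by
  have := pv_splitOn_join_go ls hls hnl ((PySem.Chars.join ['\n'] ls).length + 1) [] (by omega)
  simpa [PySem.Chars.splitOn] using this


-- replace is the identity when the pattern's first char does not occur
theorem pv_replace_go_self (a : Char) (old' new : List Char) :
    ∀ (l : List Char), a ∉ l → ∀ (fuel : Nat) (acc : List Char),
      PySem.Chars.replace.go (a :: old') new fuel l acc = acc.reverse ++ l := by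
  intro l
  induction l with
  | nil =>
    intro _ fuel acc
    cases fuel <;> simp [PySem.Chars.replace.go]
  | cons c t ih =>
    intro hmem fuel acc
    cases fuel with
    | zero => simp [PySem.Chars.replace.go]
    | succ fuel =>
      have hc : a ≠ c := fun h => hmem (by simp [h])
      have hpre : (a :: old').isPrefixOf (c :: t) = false := by
        simp [List.isPrefixOf, hc]
      simp only [PySem.Chars.replace.go, hpre, Bool.false_eq_true, if_false]
      rw [ih (fun h => hmem (List.mem_cons_of_mem _ h)) fuel (c :: acc)]
      simp

theorem pv_replace_self (l : List Char) (a : Char) (old' new : List Char) (h : a ∉ l) :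
    PySem.Chars.replace l (a :: old') new = l := by
  simp only [PySem.Chars.replace, List.isEmpty_cons, Bool.false_eq_true, if_false]
  rw [pv_replace_go_self a old' new l h l.length []]
  simp

-- single-char replace removes every occurrence (when the replacement avoids it)
theorem pv_replace_go_removes (a : Char) (new : List Char) (hnew : a ∉ new) :
    ∀ (fuel : Nat) (l acc : List Char), l.length ≤ fuel → a ∉ acc →
      a ∉ PySem.Chars.replace.go [a] new fuel l acc := by
  intro fuel
  induction fuel with
  | zero =>
    intro l acc hle hacc
    cases l with
    | nil => simpa [PySem.Chars.replace.go] using hacc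
    | cons c t => simp at hle
  | succ fuel ih =>
    intro l acc hle hacc
    cases l with
    | nil => simpa [PySem.Chars.replace.go] using hacc
    | cons c t =>
      by_cases hpre : (List.isPrefixOf [a] (c :: t) : Bool)
      · simp only [PySem.Chars.replace.go, hpre, if_true]
        refine ih _ _ (by simp at hle ⊢; omega) ?_
        intro h
        rcases List.mem_append.mp h with h | h
        · exact hnew (List.mem_reverse.mp h)
        · exact hacc h
      · simp only [PySem.Chars.replace.go, hpre, Bool.false_eq_true, if_false]
        have hc : a ≠ c := by
          simp [List.isPrefixOf] at hpre
          exact fun h => hpre (by simp [h])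
        refine ih _ _ (by simp at hle ⊢; omega) ?_
        intro h
        rcases List.mem_cons.mp h with h | h
        · exact hc h
        · exact hacc h

theorem pv_replace_removes (l : List Char) (a : Char) (new : List Char) (hnew : a ∉ new) :
    a ∉ PySem.Chars.replace l [a] new := by
  simp only [PySem.Chars.replace, List.isEmpty_cons, Bool.false_eq_true, if_false]
  exact pv_replace_go_removes a new hnew l.length l [] le_rfl (by simp)

-- replace introduces no new characters
theorem pv_replace_go_no_new (old new : List Char) (x : Char) (hnew : x ∉ new) :
    ∀ (fuel : Nat) (l acc : List Char), x ∉ l → x ∉ acc →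
      x ∉ PySem.Chars.replace.go old new fuel l acc := by
  intro fuel
  induction fuel with
  | zero =>
    intro l acc hl hacc h
    simp only [PySem.Chars.replace.go] at h
    rcases List.mem_append.mp h with h | h
    · exact hacc (List.mem_reverse.mp h)
    · exact hl h
  | succ fuel ih =>
    intro l acc hl hacc
    cases l with
    | nil => simpa [PySem.Chars.replace.go] using hacc
    | cons c t =>
      by_cases hpre : (List.isPrefixOf old (c :: t) : Bool)
      · simp only [PySem.Chars.replace.go, hpre, if_true]
        refine ih _ _ (fun h => hl (List.mem_of_mem_drop h)) ?_
        intro h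
        rcases List.mem_append.mp h with h | h
        · exact hnew (List.mem_reverse.mp h)
        · exact hacc h
      · simp only [PySem.Chars.replace.go, hpre, Bool.false_eq_true, if_false]
        refine ih _ _ (fun h => hl (List.mem_cons_of_mem _ h)) ?_
        intro h
        rcases List.mem_cons.mp h with h | h
        · exact hl (by simp [h])
        · exact hacc h

theorem pv_replace_no_new (l old new : List Char) (x : Char) (hl : x ∉ l) (hnew : x ∉ new) :
    x ∉ PySem.Chars.replace l old new := by
  by_cases hold : (old.isEmpty : Bool)
  · simp only [PySem.Chars.replace, hold, if_true]
    intro h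
    rcases List.mem_append.mp h with h | h
    · exact hnew h
    · rcases List.mem_flatMap.mp h with ⟨c, hc, hmem⟩
      rcases List.mem_cons.mp hmem with h | h
      · exact hl (h ▸ hc)
      · exact hnew h
  · simp only [PySem.Chars.replace, hold, Bool.false_eq_true, if_false]
    exact pv_replace_go_no_new old new x hnew l.length l [] hl (by simp)



theorem pv_nul_not_mem_normalize (s : List Char) : Char.ofNat 0 ∉ pvNormalize s := by
  unfold pvNormalize
  refine pv_replace_no_new _ _ _ _ (pv_replace_no_new _ _ _ _ (pv_replace_removes s _ _ (by decide)) (by decide)) (by decide)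

theorem pv_normalize_eq_self (l : List Char) (h0 : Char.ofNat 0 ∉ l) (hr : '\r' ∉ l) :
    pvNormalize l = l := by
  unfold pvNormalize
  rw [pv_replace_self l _ _ _ h0, pv_replace_self l _ _ _ hr, pv_replace_self l _ _ _ hr]

-- join facts
theorem pv_mem_join (sep : List Char) (ps : List (List Char)) (c : Char) :
    c ∈ PySem.Chars.join sep ps → c ∈ sep ∨ ∃ p ∈ ps, c ∈ p := by
  induction ps with
  | nil => intro h; rw [PySem.Chars.join_nil] at h; simp at h
  | cons p rest ih =>
    cases rest with
    | nil =>
      intro h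
      rw [PySem.Chars.join_singleton] at h
      exact Or.inr ⟨p, by simp, h⟩
    | cons p2 rest2 =>
      intro h
      rw [PySem.Chars.join_cons_cons] at h
      rcases List.mem_append.mp h with h | h
      · rcases List.mem_append.mp h with h | h
        · exact Or.inr ⟨p, by simp, h⟩
        · exact Or.inl h
      · rcases ih h with h | ⟨q, hq, hc⟩
        · exact Or.inl h
        · exact Or.inr ⟨q, List.mem_cons_of_mem _ hq, hc⟩

theorem pv_join_cons_ne_nil (sep : List Char) (p : List Char) (rest : List (List Char)) (hp : p ≠ []) :
    PySem.Chars.join sep (p :: rest) ≠ [] := by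
  cases rest with
  | nil => rw [PySem.Chars.join_singleton]; exact hp
  | cons p2 rest2 =>
    rw [PySem.Chars.join_cons_cons]
    simp [hp]

theorem pv_join_head? (sep : List Char) (p : List Char) (rest : List (List Char)) (hp : p ≠ []) :
    (PySem.Chars.join sep (p :: rest)).head? = p.head? := by
  cases rest with
  | nil => rw [PySem.Chars.join_singleton]
  | cons p2 rest2 =>
    rw [PySem.Chars.join_cons_cons]
    rw [List.append_assoc, List.head?_append_of_ne_nil _ hp]

theorem pv_join_getLast? (sep : List Char) (ps : List (List Char))
    (h : ∀ p ∈ ps, p ≠ []) (hps : ps ≠ []) :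
    (PySem.Chars.join sep ps).getLast? = (ps.getLast hps).getLast? := by
  induction ps with
  | nil => simp at hps
  | cons p rest ih =>
    cases rest with
    | nil => rw [PySem.Chars.join_singleton]; simp
    | cons p2 rest2 =>
      rw [PySem.Chars.join_cons_cons]
      have hne : PySem.Chars.join sep (p2 :: rest2) ≠ [] :=
        pv_join_cons_ne_nil sep p2 rest2 (h p2 (by simp))
      rw [List.getLast?_append_of_ne_nil _ hne,
        ih (fun x hx => h x (List.mem_cons_of_mem _ hx)) (by simp)]
      simp [List.getLast_cons]

def pvGood0 (tk : List Char) : Prop :=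
  tk ≠ [] ∧ ∀ c ∈ tk, PySem.Chars.isspace c = false ∧ c ≠ Char.ofNat 0

theorem pv_strip_eq_self (l : List Char)
    (h1 : l.head?.all (fun c => !PySem.Chars.isspace c))
    (h2 : l.getLast?.all (fun c => !PySem.Chars.isspace c)) :
    PySem.Chars.strip l = l := by
  have hls : PySem.Chars.lstrip l = l := by
    unfold PySem.Chars.lstrip
    cases l with
    | nil => rfl
    | cons c t => simp_all [List.dropWhile]
  unfold PySem.Chars.strip PySem.Chars.rstrip
  rw [hls]
  have hrw : l.reverse.dropWhile PySem.Chars.isspace = l.reverse := by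
    cases hrev : l.reverse with
    | nil => rfl
    | cons c t =>
      have hg : l.getLast? = some c := by
        rw [← List.head?_reverse, hrev]; rfl
      rw [hg] at h2
      simp only [Option.all_some] at h2
      simp only [List.dropWhile]
      simp at h2
      simp [h2]
  rw [hrw, List.reverse_reverse]

theorem pv_join_head_ws (tks : List (List Char)) (h : ∀ tk ∈ tks, pvGood0 tk) :
    (PySem.Chars.join [' '] tks).head?.all (fun c => !PySem.Chars.isspace c) := by
  cases tks with
  | nil => rw [PySem.Chars.join_nil]; rfl
  | cons tk rest =>
    have h1 := h tk (by simp)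
    rw [pv_join_head? [' '] tk rest h1.1]
    cases htk : tk with
    | nil => exact absurd htk h1.1
    | cons c t =>
      simp only [List.head?_cons, Option.all_some]
      simp [(h1.2 c (by simp [htk])).1]

theorem pv_join_getLast_ws (tks : List (List Char)) (h : ∀ tk ∈ tks, pvGood0 tk) :
    (PySem.Chars.join [' '] tks).getLast?.all (fun c => !PySem.Chars.isspace c) := by
  cases htks : tks with
  | nil => rw [PySem.Chars.join_nil]; rfl
  | cons tk rest =>
    subst htks
    have hne : ∀ p ∈ tk :: rest, p ≠ [] := fun p hp => (h p hp).1
    rw [pv_join_getLast? [' '] (tk :: rest) hne (by simp)]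
    have hmem := List.getLast_mem (l := tk :: rest) (by simp)
    have hg := h _ hmem
    cases hlast : (tk :: rest).getLast (by simp) with
    | nil => exact absurd hlast hg.1
    | cons c t =>
      rw [hlast] at hg
      have : ((c :: t).getLast?).all (fun c => !PySem.Chars.isspace c) := by
        have hm := List.getLast_mem (l := c :: t) (by simp)
        rw [List.getLast?_eq_some_getLast (by simp)]
        simp [(hg.2 _ hm).1]
      exact this

theorem pv_notmem_joinTok (tks : List (List Char)) (h : ∀ tk ∈ tks, pvGood0 tk)
    (x : Char) (hx : PySem.Chars.isspace x = true ∨ x = Char.ofNat 0) (hxs : x ≠ ' ') :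
    x ∉ PySem.Chars.join [' '] tks := by
  intro hmem
  rcases pv_mem_join [' '] tks x hmem with hc | ⟨tk, htk, hc⟩
  · simp at hc; exact hxs hc
  · have := (h tk htk).2 x hc
    rcases hx with h1 | h1
    · rw [this.1] at h1; cases h1
    · exact this.2 h1

theorem pv_join_good_ne_nil (tks : List (List Char)) (h : ∀ tk ∈ tks, pvGood0 tk) :
    PySem.Chars.join [' '] tks = [] ↔ tks = [] := by
  constructor
  · intro hj
    cases tks with
    | nil => rfl
    | cons tk rest => exact absurd hj (pv_join_cons_ne_nil [' '] tk rest (h tk (by simp)).1)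
  · intro h; subst h; rw [PySem.Chars.join_nil]

-- the tokens of each raw line of the normalized text
def pvTokLines (s : List Char) : List (List (List Char)) :=
  (PySem.Chars.splitOn (pvNormalize s) ['\n']).map PySem.Chars.split₀

theorem pv_tokLines_good (s : List Char) :
    ∀ tks ∈ pvTokLines s, ∀ tk ∈ tks, pvGood0 tk := by
  intro tks htks tk htk
  rcases List.mem_map.mp htks with ⟨p, hp, rfl⟩
  have hs := pv_split₀_sound p tk htk
  refine ⟨hs.1, fun c hc => ⟨(hs.2 c hc).1, fun h0 => ?_⟩⟩
  have : c ∈ pvNormalize s := pv_splitOn_mem _ _ p hp c (hs.2 c hc).2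
  rw [h0] at this
  exact pv_nul_not_mem_normalize s this

def pvL (tks : List (List Char)) : List Char := tks.headD []
def pvR (tks : List (List Char)) : List Char := PySem.Chars.join [' '] tks.tail



def pvTssf (s : List Char) : List (List (List Char)) :=
  (pvTokLines s).filter (fun tks => tks ≠ [])

theorem pv_tssf_good (s : List Char) :
    ∀ tks ∈ pvTssf s, (∀ tk ∈ tks, pvGood0 tk) ∧ tks ≠ [] := by
  intro tks htks
  have h := List.mem_filter.mp htks
  exact ⟨pv_tokLines_good s tks h.1, by simpa using h.2⟩

theorem pv_joinLines_strip (lines : List (List Char))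
    (hL : ∀ L ∈ lines, L ≠ [] ∧ L.head?.all (fun c => !PySem.Chars.isspace c)
      ∧ L.getLast?.all (fun c => !PySem.Chars.isspace c)) :
    PySem.Chars.strip (PySem.Chars.join ['\n'] lines) = PySem.Chars.join ['\n'] lines := by
  cases lines with
  | nil => rw [PySem.Chars.join_nil]; rfl
  | cons L rest =>
    apply pv_strip_eq_self
    · rw [pv_join_head? _ L rest (hL L (by simp)).1]
      exact (hL L (by simp)).2.1
    · rw [pv_join_getLast? _ (L :: rest) (fun p hp => (hL p hp).1) (by simp)]
      exact (hL _ (List.getLast_mem _)).2.2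

-- the clean step produces exactly the joined compact lines
theorem pv_clean_char (s : List Char) :
    pvCleanKeepNL s = PySem.Chars.join ['\n'] ((pvTssf s).map (PySem.Chars.join [' '])) := by
  show PySem.Chars.strip (PySem.Chars.join ['\n']
      (((PySem.Chars.splitOn (pvNormalize s) ['\n']).map
        (fun line => PySem.Chars.strip (PySem.Chars.join [' '] (PySem.Chars.split₀ line)))).filter
        (fun l => l ≠ ([] : List Char)))) = _
  have hmap : (PySem.Chars.splitOn (pvNormalize s) ['\n']).map
      (fun line => PySem.Chars.strip (PySem.Chars.join [' '] (PySem.Chars.split₀ line)))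
      = (pvTokLines s).map (PySem.Chars.join [' ']) := by
    rw [pvTokLines, List.map_map]
    refine List.map_congr_left fun p hp => ?_
    have hg : ∀ tk ∈ PySem.Chars.split₀ p, pvGood0 tk :=
      pv_tokLines_good s _ (List.mem_map_of_mem hp)
    exact pv_strip_eq_self _ (pv_join_head_ws _ hg) (pv_join_getLast_ws _ hg)
  rw [hmap]
  have hfil : ((pvTokLines s).map (PySem.Chars.join [' '])).filter (fun l => l ≠ ([] : List Char))
      = (pvTssf s).map (PySem.Chars.join [' ']) := by
    rw [pvTssf, List.filter_map]
    congr 1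
    refine List.filter_congr fun tks htks => ?_
    have hg := pv_tokLines_good s tks htks
    simp [Function.comp, pv_join_good_ne_nil tks hg]
  rw [hfil]
  -- outer strip is the identity
  apply pv_joinLines_strip
  intro L hLmem
  rcases List.mem_map.mp hLmem with ⟨tks, htks, rfl⟩
  have hg := pv_tssf_good s tks htks
  exact ⟨fun h => hg.2 ((pv_join_good_ne_nil tks hg.1).mp h),
    pv_join_head_ws _ hg.1, pv_join_getLast_ws _ hg.1⟩

-- per-line behaviour of A on an already-compact line
theorem pv_lineA (tks : List (List Char)) (hg : ∀ tk ∈ tks, pvGood0 tk) (hne : tks ≠ [])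
    (fuel : Nat) :
    pvSplitA (fuel + 1) (PySem.Chars.join [' '] tks) = (pvL tks, pvR tks) := by
  obtain ⟨tk, rest, rfl⟩ := List.exists_cons_of_ne_nil hne
  set L := PySem.Chars.join [' '] (tk :: rest) with hLdef
  have hLne : L ≠ [] := pv_join_cons_ne_nil _ _ _ (hg tk (by simp)).1
  have hgd : ∀ tk' ∈ (tk :: rest), tk' ≠ [] ∧ ∀ c ∈ tk', PySem.Chars.isspace c = false :=
    fun tk' h => ⟨(hg tk' h).1, fun c hc => ((hg tk' h).2 c hc).1⟩
  have hnl : '\n' ∉ L := pv_notmem_joinTok _ hg '\n' (Or.inl (by decide)) (by decide)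
  have hclean : pvCleanKeepNL L = L := by
    show PySem.Chars.strip (PySem.Chars.join ['\n']
        (((PySem.Chars.splitOn (pvNormalize L) ['\n']).map
          (fun line => PySem.Chars.strip (PySem.Chars.join [' '] (PySem.Chars.split₀ line)))).filter
          (fun l => l ≠ ([] : List Char)))) = _
    have h0 : Char.ofNat 0 ∉ L := pv_notmem_joinTok _ hg _ (Or.inr rfl) (by decide)
    have hr : '\r' ∉ L := pv_notmem_joinTok _ hg '\r' (Or.inl (by decide)) (by decide)
    rw [pv_normalize_eq_self L h0 hr]
    rw [show PySem.Chars.splitOn L ['\n'] = [L] from by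
      have h := pv_splitOn_join [L] (by simp) (by simpa using hnl)
      rwa [PySem.Chars.join_singleton] at h]
    rw [List.map_singleton, hLdef, pv_split₀_join _ hgd]
    rw [pv_strip_eq_self _ (pv_join_head_ws _ hg) (pv_join_getLast_ws _ hg)]
    rw [List.filter_singleton]
    have hdec : (decide (PySem.Chars.join [' '] (tk :: rest) ≠ ([] : List Char))) = true := by
      simpa using hLne
    rw [hdec, cond_true, PySem.Chars.join_singleton]
    exact pv_strip_eq_self _ (pv_join_head_ws _ hg) (pv_join_getLast_ws _ hg)
  have hisin : PySem.Chars.isIn ['\n'] L = false :=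
    (PySem.Chars.isIn_eq_false_iff _ _).mpr (fun h => hnl ((List.singleton_infix_iff ..).mp h))
  show pvSplitA (fuel + 1) L = _
  rw [pvSplitA]
  simp only [hclean, hLne, hisin, Bool.false_eq_true, if_false]
  rw [hLdef, pv_split₀_join _ hgd]
  cases rest with
  | nil => simp [pvL, pvR, PySem.Chars.join_nil]
  | cons tk2 rest2 =>
    rw [if_neg (by simp)]
    simp [pvL, pvR]

theorem pv_A_master (s : List Char) (fuel : Nat) :
    pvSplitA (fuel + 2) s =
      (PySem.Chars.join ['\n'] ((pvTssf s).map pvL),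
       PySem.Chars.join ['\n'] (((pvTssf s).map pvR).filter (fun p => p ≠ ([] : List Char)))) := by
  show pvSplitA ((fuel + 1) + 1) s = _
  rw [pvSplitA]
  simp only [pv_clean_char s]
  cases htssf : pvTssf s with
  | nil =>
    rw [List.map_nil, PySem.Chars.join_nil]
    simp [PySem.Chars.join_nil]
  | cons tks rest =>
    have hgood : ∀ t ∈ tks :: rest, (∀ tk ∈ t, pvGood0 tk) ∧ t ≠ [] := by
      intro t ht; exact pv_tssf_good s t (htssf ▸ ht)
    have hlineprops : ∀ L ∈ (tks :: rest).map (PySem.Chars.join [' ']),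
        L ≠ [] ∧ '\n' ∉ L ∧ PySem.Chars.strip L = L := by
      intro L hL
      rcases List.mem_map.mp hL with ⟨t, ht, rfl⟩
      have hg := hgood t ht
      exact ⟨(pv_join_good_ne_nil t hg.1).not.mpr hg.2,
        pv_notmem_joinTok t hg.1 '\n' (Or.inl (by decide)) (by decide),
        pv_strip_eq_self _ (pv_join_head_ws _ hg.1) (pv_join_getLast_ws _ hg.1)⟩
    have hcne : PySem.Chars.join ['\n'] ((tks :: rest).map (PySem.Chars.join [' '])) ≠ [] := by
      apply pv_join_cons_ne_nil
      exact (hlineprops _ (by simp)).1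
    rw [if_neg hcne]
    cases rest with
    | nil =>
      -- single compact line: A takes the no-newline branch
      rw [List.map_singleton, PySem.Chars.join_singleton]
      have hg := (hgood tks (by simp))
      have hnl : '\n' ∉ PySem.Chars.join [' '] tks := (hlineprops _ (by simp)).2.1
      have hisin : PySem.Chars.isIn ['\n'] (PySem.Chars.join [' '] tks) = false :=
        (PySem.Chars.isIn_eq_false_iff _ _).mpr (fun h => hnl ((List.singleton_infix_iff ..).mp h))
      rw [hisin]
      simp only [Bool.false_eq_true, if_false]
      have hgd : ∀ tk ∈ tks, tk ≠ [] ∧ ∀ c ∈ tk, PySem.Chars.isspace c = false :=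
        fun tk h => ⟨(hg.1 tk h).1, fun c hc => ((hg.1 tk h).2 c hc).1⟩
      rw [pv_split₀_join _ hgd]
      obtain ⟨tk, tksrest, rfl⟩ := List.exists_cons_of_ne_nil hg.2
      cases tksrest with
      | nil =>
        rw [if_pos (by simp)]
        simp [pvL, pvR, PySem.Chars.join_singleton, PySem.Chars.join_nil]
      | cons tk2 rest2 =>
        rw [if_neg (by simp)]
        have hr : pvR (tk :: tk2 :: rest2) ≠ [] := by
          rw [pvR]
          exact pv_join_cons_ne_nil _ _ _ ((hg.1 tk2 (by simp)).1)
        simp only [List.map_singleton, List.filter_singleton]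
        rw [show (decide (pvR (tk :: tk2 :: rest2) ≠ ([] : List Char))) = true from by simpa using hr]
        simp [pvL, pvR, PySem.Chars.join_singleton]
    | cons tks2 rest2 =>
      -- at least two compact lines: A recurses over them
      set lines := (tks :: tks2 :: rest2).map (PySem.Chars.join [' ']) with hlinesdef
      have hmemnl : '\n' ∈ PySem.Chars.join ['\n'] lines := by
        rw [hlinesdef, List.map_cons, List.map_cons, PySem.Chars.join_cons_cons]
        simp
      have hisin : PySem.Chars.isIn ['\n'] (PySem.Chars.join ['\n'] lines) = true :=
        (PySem.Chars.isIn_iff_infix _ _).mpr ((List.singleton_infix_iff ..).mpr hmemnl)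
      rw [hisin]
      simp only [if_true]
      rw [pv_splitOn_join lines (by simp [hlinesdef]) (fun L hL => (hlineprops L hL).2.1)]
      rw [show lines.map PySem.Chars.strip = lines from
        List.map_congr_left (fun L hL => (hlineprops L hL).2.2) |>.trans (List.map_id _)]
      rw [show lines.filter (fun p => p ≠ ([] : List Char)) = lines from
        List.filter_eq_self.mpr (fun L hL => by simpa using (hlineprops L hL).1)]
      rw [PySem.List.foldl_prod_mk (f := fun a e => a ++ [(pvSplitA (fuel + 1) e).1])
        (g := fun a e => a ++ [(pvSplitA (fuel + 1) e).2])]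
      rw [PySem.List.foldl_append_singleton_eq_map, PySem.List.foldl_append_singleton_eq_map]
      simp only [List.nil_append]
      rw [hlinesdef, List.map_map, List.map_map]
      have hmapl : (tks :: tks2 :: rest2).map ((fun L => (pvSplitA (fuel + 1) L).1) ∘ PySem.Chars.join [' '])
          = (tks :: tks2 :: rest2).map pvL := by
        refine List.map_congr_left fun t ht => ?_
        have hg := hgood t ht
        simp [Function.comp, pv_lineA t hg.1 hg.2 fuel]
      have hmapr : (tks :: tks2 :: rest2).map ((fun L => (pvSplitA (fuel + 1) L).2) ∘ PySem.Chars.join [' '])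
          = (tks :: tks2 :: rest2).map pvR := by
        refine List.map_congr_left fun t ht => ?_
        have hg := hgood t ht
        simp [Function.comp, pv_lineA t hg.1 hg.2 fuel]
      rw [hmapl, hmapr]
      rw [List.filter_eq_self.mpr (fun p hp => by
        rcases List.mem_map.mp hp with ⟨t, ht, rfl⟩
        have hg := hgood t ht
        obtain ⟨tk, tr, rfl⟩ := List.exists_cons_of_ne_nil hg.2
        simpa [pvL] using (hg.1 tk (by simp)).1)]


theorem pv_B_fold (ps : List (List Char)) :
    ∀ acc : List (List Char) × List (List Char),
      ps.foldl (fun acc line =>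
          match PySem.Chars.split₀ line with
          | [] => acc
          | p0 :: rest =>
            (acc.1 ++ [p0], if rest = [] then acc.2 else acc.2 ++ [PySem.Chars.join [' '] rest])) acc
        = (acc.1 ++ (ps.map PySem.Chars.split₀).filterMap (fun tks => tks.head?),
           acc.2 ++ (ps.map PySem.Chars.split₀).filterMap (fun tks =>
             match tks with
             | _ :: r :: rs => some (PySem.Chars.join [' '] (r :: rs))
             | _ => none)) := by
  induction ps with
  | nil => intro acc; simp
  | cons p rest ih =>
    intro acc
    rw [List.foldl_cons, List.map_cons, List.filterMap_cons, List.filterMap_cons]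
    cases hp : PySem.Chars.split₀ p with
    | nil => simpa using ih acc
    | cons p0 prest =>
      cases prest with
      | nil => simpa [List.append_assoc] using ih (acc.1 ++ [p0], acc.2)
      | cons r rs =>
        simpa [List.append_assoc] using
          ih (acc.1 ++ [p0], acc.2 ++ [PySem.Chars.join [' '] (r :: rs)])

theorem pv_bridge_left (tss : List (List (List Char))) :
    tss.filterMap (fun tks => tks.head?)
      = (tss.filter (fun tks => tks ≠ ([] : List (List Char)))).map pvL := by
  induction tss with
  | nil => rfl
  | cons tks rest ih =>
    cases tks with
    | nil => simpa using ih
    | cons tk tr => simp [pvL, ih]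

theorem pv_bridge_right (tss : List (List (List Char)))
    (h : ∀ tks ∈ tss, ∀ tk ∈ tks, pvGood0 tk) :
    tss.filterMap (fun tks =>
        match tks with
        | _ :: r :: rs => some (PySem.Chars.join [' '] (r :: rs))
        | _ => none)
      = ((tss.filter (fun tks => tks ≠ ([] : List (List Char)))).map pvR).filter
          (fun p => p ≠ ([] : List Char)) := by
  induction tss with
  | nil => rfl
  | cons tks rest ih =>
    have ih' := ih (fun t ht => h t (List.mem_cons_of_mem _ ht))
    cases tks with
    | nil => simpa using ih'
    | cons tk tr =>
      cases tr with
      | nil => simp [pvR, PySem.Chars.join_nil, ih']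
      | cons r rs =>
        have hrne : PySem.Chars.join [' '] (r :: rs) ≠ [] :=
          pv_join_cons_ne_nil [' '] r rs ((h (tk :: r :: rs) (by simp) r (by simp)).1)
        simp [pvR, ih', hrne]

theorem pv_AB (cell : String) :
    split_cell_for_extra_column_py cell = split_cell_for_extra_column_py_alt cell := by
  show (let r := pvSplitA (cell.toList.length + 2) cell.toList
    (String.ofList r.1, String.ofList r.2)) = _
  rw [pv_A_master cell.toList cell.toList.length]
  show _ = (let text := pvNormalize cell.toList
    let lr := (PySem.Chars.splitOn text ['\n']).foldl (fun acc line =>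
        match PySem.Chars.split₀ line with
        | [] => acc
        | p0 :: rest =>
          (acc.1 ++ [p0], if rest = [] then acc.2 else acc.2 ++ [PySem.Chars.join [' '] rest]))
      (([] : List (List Char)), ([] : List (List Char)))
    (String.ofList (PySem.Chars.join ['\n'] lr.1), String.ofList (PySem.Chars.join ['\n'] lr.2)))
  simp only
  rw [pv_B_fold]
  simp only [List.nil_append]
  rw [show (PySem.Chars.splitOn (pvNormalize cell.toList) ['\n']).map PySem.Chars.split₀
    = pvTokLines cell.toList from rfl]
  rw [pv_bridge_left, pv_bridge_right _ (pv_tokLines_good cell.toList)]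
  rfl


-- ===== VERDICT (by name: the statement is the Claim_ definition above) =====
theorem split_cell_for_extra_column_py_spec : Claim_equal_split_cell_for_extra_column_py := by
  intro cell _
  unfold Spec_split_cell_for_extra_column_py
  exact pv_AB cell
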